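-- pv_equiv track=rewrite | github.com/itrin9634/Algorithm-Study | 프로그래머스/lv1/42840. 모의고사/모의고사.py | solution
-- ===== SOURCE A (Python) =====
-- def solution(answers):
--     answer = []
--     hash = dict()
--     arr = [[1, 2, 3, 4, 5], [2, 1, 2, 3, 2, 4, 2, 5,], [3, 3, 1, 1, 2, 2, 4, 4, 5, 5]]
--     for i in range(3):
--         cnt = 0
--         for j in range(len(answers)):
--             if answers[j] == arr[i][j % len(arr[i])]:
--                 cnt += 1
--         hash[i+1] = cnt
--     MAX = max(hash.values())
--     for (i, v) in hash.items():
--         if v == MAX: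
--             answer.append(i)
--
--     return answer
-- ===== SOURCE B (Python) =====
-- def solution(answers):
--     # Histogram approach: one tallying pass keyed by (position mod 40, answer value)
--     # (40 = lcm of the three pattern lengths), then each pattern's score is read off
--     # the histogram with 40 lookups; no comparison against patterns during the scan.
--     hist = {}
--     for j, x in enumerate(answers):
--         key = (j % 40, x)
--         hist[key] = hist.get(key, 0) + 1
--     patterns = [[1, 2, 3, 4, 5], [2, 1, 2, 3, 2, 4, 2, 5], [3, 3, 1, 1, 2, 2, 4, 4, 5, 5]]
--     counts = [sum(hist.get((r, p[r % len(p)]), 0) for r in range(40)) for p in patterns]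
--     best = max(counts)
--     return [i + 1 for i in range(3) if counts[i] == best]
-- ===== Notes on version B (the rewrite author's own statement) =====
-- stated objective: alternative
-- what changed: B replaces A's three pattern-comparing scans of answers with a single tallying pass that builds a histogram keyed by (position mod 40, value) (40 = lcm of the pattern lengths) and never looks at the patterns while scanning; each pattern's score is then recovered from the histogram with 40 constant-time lookups, and the winners are collected from the counts list.
import Mathlib
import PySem

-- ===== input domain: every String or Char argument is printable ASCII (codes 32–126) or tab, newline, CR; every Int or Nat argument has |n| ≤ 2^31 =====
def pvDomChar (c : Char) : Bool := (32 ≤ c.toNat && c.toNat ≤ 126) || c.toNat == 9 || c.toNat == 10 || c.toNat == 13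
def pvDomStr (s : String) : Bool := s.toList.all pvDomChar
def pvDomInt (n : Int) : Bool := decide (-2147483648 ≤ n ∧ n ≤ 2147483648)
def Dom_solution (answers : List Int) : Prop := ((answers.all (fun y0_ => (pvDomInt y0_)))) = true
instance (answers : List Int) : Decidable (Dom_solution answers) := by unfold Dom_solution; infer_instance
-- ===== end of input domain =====

-- B builds a (position mod 40, value) histogram in one tallying pass and reads each pattern's score off it, instead of A's three pattern-comparing scans; same value everywhere.

-- ===== PORT A =====
def solution (answers : List Int) : List Int :=
  let answer : List Int := []
  let hash : PySem.Dict Int Int := PySem.Dict.empty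
  let arr : List (List Int) := [[1, 2, 3, 4, 5], [2, 1, 2, 3, 2, 4, 2, 5], [3, 3, 1, 1, 2, 2, 4, 4, 5, 5]]
  let hash := (PySem.List.pyRange 0 3 1).foldl (fun hash i =>
    let cnt := (PySem.List.pyRange 0 (answers.length : Int) 1).foldl (fun cnt j =>
      if PySem.List.pyGetD answers j 0 ==
          PySem.List.pyGetD (PySem.List.pyGetD arr i [])
            (PySem.Int.mod j ((PySem.List.pyGetD arr i []).length : Int)) 0
      then cnt + 1 else cnt) (0 : Int)
    hash.insert (i + 1) cnt) hash
  let MAX : Int := (PySem.List.max? hash.values (fun v => v)).getD 0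
  hash.items.foldl (fun answer iv => if iv.2 == MAX then answer ++ [iv.1] else answer) answer

-- ===== PORT B =====
def solution_alt (answers : List Int) : List Int :=
  let hist : PySem.Dict (Int × Int) Int :=
    (PySem.List.enumerate answers 0).foldl (fun hist jx =>
      let key : Int × Int := (PySem.Int.mod jx.1 40, jx.2)
      hist.insert key (hist.getD key 0 + 1)) PySem.Dict.empty
  let patterns : List (List Int) := [[1, 2, 3, 4, 5], [2, 1, 2, 3, 2, 4, 2, 5], [3, 3, 1, 1, 2, 2, 4, 4, 5, 5]]
  let counts : List Int := patterns.map (fun p =>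
    ((PySem.List.pyRange 0 40 1).map (fun r =>
      hist.getD (r, PySem.List.pyGetD p (PySem.Int.mod r (p.length : Int)) 0) 0)).sum)
  let best : Int := (PySem.List.max? counts (fun v => v)).getD 0
  ((PySem.List.pyRange 0 3 1).filter (fun i => PySem.List.pyGetD counts i 0 == best)).map (· + 1)

-- ===== PRECONDITION & SPEC =====
def Spec_solution (answers : List Int) (out : List Int) : Prop := out = solution_alt answers
instance (answers : List Int) (out : List Int) : Decidable (Spec_solution answers out) := by unfold Spec_solution; infer_instance

-- ===== CLAIM (what is proved, stated in full; the proofs are below) =====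
def Claim_equal_solution : Prop := ∀ (answers : List Int), Dom_solution answers → Spec_solution answers (solution answers)

-- ===== LEMMAS AND PROOFS =====

-- reading B's histogram at one key is a count over the key list
theorem hist_getD (answers : List Int) (k : Int × Int) :
    ((PySem.List.enumerate answers 0).foldl (fun hist jx =>
        hist.insert ((PySem.Int.mod jx.1 40, jx.2) : Int × Int)
          (hist.getD (PySem.Int.mod jx.1 40, jx.2) 0 + 1)) PySem.Dict.empty).getD k 0 =
      (((PySem.List.enumerate answers 0).map (fun jx => ((PySem.Int.mod jx.1 40, jx.2) : Int × Int))).count k : Int) := by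
  have h := PySem.Dict.getD_foldl_insert_add_one
    ((PySem.List.enumerate answers 0).map (fun jx => ((PySem.Int.mod jx.1 40, jx.2) : Int × Int)))
    PySem.Dict.empty k
  rw [List.foldl_map] at h
  exact h.trans (by simp [PySem.Dict.empty, PySem.Dict.getD, PySem.Dict.get?])

-- Prod-Bool equality against a (r, f r) pair splits into the two components
theorem pair_beq (r a b : Int) (f : Int → Int) :
    ((((a, b) : Int × Int) == (r, f r))) = ((r == a) && (b == f r)) := by
  by_cases hr : r = a
  · subst hr; simp [Prod.ext_iff]
  · have h1 : ((((a, b) : Int × Int) == (r, f r))) = false := by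
      simp [Prod.ext_iff]; intro h; exact absurd h.symm hr
    have h2 : (r == a) = false := by simp [hr]
    rw [h1, h2, Bool.false_and]

-- summing the indicator of one in-range pair over range(40) tests the pair's second component
theorem indicator_sum (a b : Int) (f : Int → Int) (ha : 0 ≤ a) (ha' : a < 40) :
    ((PySem.List.pyRange 0 40 1).map (fun r => if ((((a, b) : Int × Int) == (r, f r))) = true then (1 : Int) else 0)).sum =
      if (b == f a) = true then 1 else 0 := by
  have h1 : (PySem.List.pyRange 0 40 1).map (fun r => if ((((a, b) : Int × Int) == (r, f r))) = true then (1 : Int) else 0)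
      = (PySem.List.pyRange 0 40 1).map (fun r => if ((r == a) && (b == f r)) = true then (1 : Int) else 0) := by
    refine List.map_eq_map_iff.mpr ?_
    intro r _
    rw [pair_beq]
  rw [h1]
  by_cases hb : b = f a
  · have h2 : (PySem.List.pyRange 0 40 1).map (fun r => if ((r == a) && (b == f r)) = true then (1 : Int) else 0)
        = (PySem.List.pyRange 0 40 1).map (fun r => if (r == a) = true then (1 : Int) else 0) := by
      refine List.map_eq_map_iff.mpr ?_
      intro r _
      by_cases hr : r = a
      · subst hr; simp [hb]
      · simp [hr]
    rw [h2, PySem.List.sum_map_ite_one_zero]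
    have hmem : a ∈ PySem.List.pyRange 0 40 1 := by
      rw [PySem.List.mem_pyRange_one]; omega
    have hnd : (PySem.List.pyRange 0 40 1).Nodup := by decide
    rw [show (PySem.List.pyRange 0 40 1).countP (fun r => r == a) = (PySem.List.pyRange 0 40 1).count a from rfl,
       List.count_eq_one_of_mem hnd hmem]
    simp [hb]
  · have h2 : (PySem.List.pyRange 0 40 1).map (fun r => if ((r == a) && (b == f r)) = true then (1 : Int) else 0)
        = (PySem.List.pyRange 0 40 1).map (fun _ => (0 : Int)) := by
      refine List.map_eq_map_iff.mpr ?_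
      intro r _
      by_cases hr : r = a
      · subst hr; simp [hb]
      · simp [hr]
    rw [h2]
    simp [hb]

-- partition: summing per-residue counts over range(40) counts the matching pairs
theorem sum_count_partition (l : List (Int × Int)) (f : Int → Int)
    (hl : ∀ q ∈ l, 0 ≤ q.1 ∧ q.1 < 40) :
    ((PySem.List.pyRange 0 40 1).map (fun r => (l.count ((r, f r) : Int × Int) : Int))).sum =
      (l.countP (fun q => q.2 == f q.1) : Int) := by
  induction l with
  | nil => simp
  | cons q t ih =>
    have hq := hl q (List.mem_cons_self)
    have ht : ∀ q ∈ t, 0 ≤ q.1 ∧ q.1 < 40 := fun x hx => hl x (List.mem_cons_of_mem _ hx)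
    have h1 : (PySem.List.pyRange 0 40 1).map (fun r => ((q :: t).count ((r, f r) : Int × Int) : Int))
        = (PySem.List.pyRange 0 40 1).map (fun r =>
            (t.count ((r, f r) : Int × Int) : Int) + (if (q == ((r, f r) : Int × Int)) = true then 1 else 0)) := by
      refine List.map_eq_map_iff.mpr ?_
      intro r _
      rw [List.count_cons]
      push_cast
      ring
    rw [h1, PySem.List.sum_map_add_int, ih ht]
    obtain ⟨a, b⟩ := q
    rw [indicator_sum a b f hq.1 hq.2, List.countP_cons]
    push_cast
    split <;> simp

-- for a pattern length dividing 40, reducing mod 40 first does not change the index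
theorem modmod (j L : Int) (hL : 0 < L) (hdvd : L ∣ 40) :
    PySem.Int.mod (PySem.Int.mod j 40) L = PySem.Int.mod j L := by
  rw [PySem.Int.mod_eq_emod_of_pos hL, PySem.Int.mod_eq_emod_of_pos hL,
      PySem.Int.mod_eq_emod_of_pos (show (0 : Int) < 40 by omega)]
  exact Int.emod_emod_of_dvd j hdvd

-- B's 40 histogram lookups for one pattern sum to A's counting loop for that pattern
theorem score_eq (answers p : List Int) (hpos : 0 < (p.length : Int)) (hdvd : (p.length : Int) ∣ 40) :
    ((PySem.List.pyRange 0 40 1).map (fun r =>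
        (((PySem.List.enumerate answers 0).map (fun jx => ((PySem.Int.mod jx.1 40, jx.2) : Int × Int))).count
          (r, PySem.List.pyGetD p (PySem.Int.mod r (p.length : Int)) 0) : Int))).sum =
      (PySem.List.pyRange 0 (answers.length : Int) 1).foldl
        (fun cnt j => if PySem.List.pyGetD answers j 0 == PySem.List.pyGetD p (PySem.Int.mod j (p.length : Int)) 0
          then cnt + 1 else cnt) 0 := by
  rw [PySem.List.foldl_if_add_one]
  rw [sum_count_partition _ (fun r => PySem.List.pyGetD p (PySem.Int.mod r (p.length : Int)) 0) ?bound]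
  case bound =>
    intro q hq
    rw [List.mem_map] at hq
    obtain ⟨jx, _, rfl⟩ := hq
    exact ⟨PySem.Int.mod_nonneg _ (by omega), PySem.Int.mod_lt _ (by omega)⟩
  rw [List.countP_map]
  rw [PySem.List.enumerate_eq_map_pyRange (d := 0), List.countP_map]
  simp only [Function.comp_def, modmod _ _ hpos hdvd]
  simp

set_option maxRecDepth 4000 in
-- the final stage (dict → max → append loop vs. counts list → max → filter) agrees for any counts
theorem final_eq (c1 c2 c3 : Int) :
    (let hash : PySem.Dict Int Int := ((PySem.Dict.empty.insert (0 + 1) c1).insert (1 + 1) c2).insert (2 + 1) c3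
     let MAX : Int := (PySem.List.max? hash.values (fun v => v)).getD 0
     hash.items.foldl (fun answer iv => if iv.2 == MAX then answer ++ [iv.1] else answer) ([] : List Int)) =
      (let counts : List Int := [c1, c2, c3]
       let best : Int := (PySem.List.max? counts (fun v => v)).getD 0
       ((PySem.List.pyRange 0 3 1).filter (fun i => PySem.List.pyGetD counts i 0 == best)).map (· + 1)) := by
  have hm : (PySem.List.max? [c1, c2, c3] fun v => v) = some (max c1 (max c2 c3)) := by
    rw [PySem.List.max?_id_cons]; simp [List.foldl, max_assoc]
  simp only [PySem.Dict.insert, PySem.Dict.empty, PySem.Dict.values]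
  norm_num [List.foldl]
  rw [show PySem.List.pyRange 0 3 1 = [0, 1, 2] from by decide]
  rw [hm]
  simp only [Option.getD_some, List.filter,
    show ∀ x y z : Int, PySem.List.pyGetD [x, y, z] 0 0 = x from fun _ _ _ => rfl,
    show ∀ x y z : Int, PySem.List.pyGetD [x, y, z] 1 0 = y from fun _ _ _ => rfl,
    show ∀ x y z : Int, PySem.List.pyGetD [x, y, z] 2 0 = z from fun _ _ _ => rfl]
  generalize max c1 (max c2 c3) = M
  cases h1 : (c1 == M) <;> cases h2 : (c2 == M) <;> cases h3 : (c3 == M) <;>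
    simp_all

-- ===== VERDICT (by name: the statement is the Claim_ definition above) =====
theorem solution_spec : Claim_equal_solution := by
  intro answers _
  show solution answers = solution_alt answers
  unfold solution solution_alt
  rw [show PySem.List.pyRange 0 3 1 = [0, 1, 2] from by decide]
  simp only [List.foldl, List.map]
  simp only [show (PySem.List.pyGetD [[(1:Int), 2, 3, 4, 5], [2, 1, 2, 3, 2, 4, 2, 5], [3, 3, 1, 1, 2, 2, 4, 4, 5, 5]] 0 []) = [1, 2, 3, 4, 5] from by decide,
      show (PySem.List.pyGetD [[(1:Int), 2, 3, 4, 5], [2, 1, 2, 3, 2, 4, 2, 5], [3, 3, 1, 1, 2, 2, 4, 4, 5, 5]] 1 []) = [2, 1, 2, 3, 2, 4, 2, 5] from by decide,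
      show (PySem.List.pyGetD [[(1:Int), 2, 3, 4, 5], [2, 1, 2, 3, 2, 4, 2, 5], [3, 3, 1, 1, 2, 2, 4, 4, 5, 5]] 2 []) = [3, 3, 1, 1, 2, 2, 4, 4, 5, 5] from by decide]
  simp only [hist_getD]
  rw [score_eq answers [1, 2, 3, 4, 5] (by norm_num) (by norm_num),
      score_eq answers [2, 1, 2, 3, 2, 4, 2, 5] (by norm_num) (by norm_num),
      score_eq answers [3, 3, 1, 1, 2, 2, 4, 4, 5, 5] (by norm_num) (by norm_num)]
  exact final_eq _ _ _
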